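-- pv_equiv track=rewrite | github.com/HoChangSUNG/baekjoon_python | stack/keylogger.py | get_password
-- ===== SOURCE A (Python) =====
-- def get_password(key_logger):
--     left = []
--     right = []
--     for key in key_logger:
--         if key=='<':
--             if left:
--                 right.append(left.pop())
--         elif key=='>':
--             if right:
--                 left.append(right.pop())
--         elif key=='-':
--             if left:
--                 left.pop()
--         else:
--             left.append(key)
--     return "".join(left)+"".join(right[::-1])
-- ===== SOURCE B (Python) =====
-- def get_password(key_logger):
--     buffer = []
--     i = 0
--     for key in key_logger:
--         if key == '<':
--             if i > 0:
--                 i -= 1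
--         elif key == '>':
--             if i < len(buffer):
--                 i += 1
--         elif key == '-':
--             if i > 0:
--                 del buffer[i-1]
--                 i -= 1
--         else:
--             buffer.insert(i, key)
--             i += 1
--     return "".join(buffer)
-- ===== Notes on version B (the rewrite author's own statement) =====
-- stated objective: alternative
-- what changed: Replaces the two-stack (left/right) representation with a single buffer list plus an integer cursor index, using positional insert/delete instead of stack pushes and pops.
import Mathlib
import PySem

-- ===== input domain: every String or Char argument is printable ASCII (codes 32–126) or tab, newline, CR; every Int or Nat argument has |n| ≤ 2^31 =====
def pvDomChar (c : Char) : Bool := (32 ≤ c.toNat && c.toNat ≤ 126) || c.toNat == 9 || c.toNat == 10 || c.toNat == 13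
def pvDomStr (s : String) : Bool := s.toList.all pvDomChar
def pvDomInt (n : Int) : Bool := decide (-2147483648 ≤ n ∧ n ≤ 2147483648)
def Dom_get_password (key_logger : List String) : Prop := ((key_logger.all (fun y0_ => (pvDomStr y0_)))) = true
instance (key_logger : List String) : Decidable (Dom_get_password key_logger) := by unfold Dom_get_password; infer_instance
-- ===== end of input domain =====

-- B replaces A's two-stack editor simulation by a single buffer list with a cursor index
-- (positional insert/delete); alternative decomposition, return value proved equal.

-- ===== PORT A =====
-- left/right are Python lists used as stacks (append/pop at the end); we represent each
-- REVERSED, head = stack top, so append = cons and pop = uncons. The final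
-- "".join(left) + "".join(right[::-1]) is then join (L.reverse) ++ join R.
def getPasswordStepA (st : List String × List String) (key : String) : List String × List String :=
  let (L, R) := st
  if key = "<" then
    match L with
    | x :: L' => (L', x :: R)
    | [] => (L, R)
  else if key = ">" then
    match R with
    | x :: R' => (x :: L, R')
    | [] => (L, R)
  else if key = "-" then
    match L with
    | _ :: L' => (L', R)
    | [] => (L, R)
  else
    (key :: L, R)

def get_password (key_logger : List String) : String :=
  let st := key_logger.foldl getPasswordStepA ([], [])
  PySem.Str.join "" st.1.reverse ++ PySem.Str.join "" st.2

-- ===== PORT B =====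
-- buffer + cursor i (0 ≤ i ≤ buffer.length always, so Nat); buffer.insert(i, key) is
-- take i ++ [key] ++ drop i and del buffer[i-1] is eraseIdx (i-1) — exact for in-range i.
def getPasswordStepB (st : List String × Nat) (key : String) : List String × Nat :=
  let (buf, i) := st
  if key = "<" then
    (buf, if i > 0 then i - 1 else i)
  else if key = ">" then
    (buf, if i < buf.length then i + 1 else i)
  else if key = "-" then
    if i > 0 then (buf.eraseIdx (i - 1), i - 1) else (buf, i)
  else
    (buf.take i ++ [key] ++ buf.drop i, i + 1)

def get_password_alt (key_logger : List String) : String :=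
  PySem.Str.join "" (key_logger.foldl getPasswordStepB ([], 0)).1

-- ===== PRECONDITION & SPEC =====
def Spec_get_password (key_logger : List String) (out : String) : Prop := out = get_password_alt key_logger
instance (key_logger : List String) (out : String) : Decidable (Spec_get_password key_logger out) := by unfold Spec_get_password; infer_instance

-- ===== CLAIM (what is proved, stated in full; the proofs are below) =====
def Claim_equal_get_password : Prop := ∀ (key_logger : List String), Dom_get_password key_logger → Spec_get_password key_logger (get_password key_logger)

-- ===== LEMMAS AND PROOFS =====

/-- Simulation relation: B's buffer is A's left (in order) followed by A's right
(reversed rep, already in final order), and B's cursor is the length of left. -/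
def stRel (a : List String × List String) (b : List String × Nat) : Prop :=
  b.1 = a.1.reverse ++ a.2 ∧ b.2 = a.1.length

theorem stRel_step (a : List String × List String) (b : List String × Nat)
    (h : stRel a b) (key : String) :
    stRel (getPasswordStepA a key) (getPasswordStepB b key) := by
  obtain ⟨L, R⟩ := a
  obtain ⟨buf, i⟩ := b
  obtain ⟨hb, hi⟩ := h
  simp only at hb hi
  subst hb hi
  by_cases h1 : key = "<"
  · cases L with
    | nil => simp [getPasswordStepA, getPasswordStepB, stRel, h1]
    | cons x L' =>
      simp [getPasswordStepA, getPasswordStepB, stRel, h1, List.append_assoc]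
  · by_cases h2 : key = ">"
    · cases R with
      | nil => simp [getPasswordStepA, getPasswordStepB, stRel, h2]
      | cons x R' =>
        simp [getPasswordStepA, getPasswordStepB, stRel, h2, List.append_assoc]
    · by_cases h3 : key = "-"
      · cases L with
        | nil => simp [getPasswordStepA, getPasswordStepB, stRel, h3]
        | cons x L' =>
          simp only [getPasswordStepA, getPasswordStepB, stRel, h3, if_pos,
            List.reverse_cons, List.length_cons, Nat.succ_sub_one, gt_iff_lt,
            Nat.succ_pos]
          refine ⟨?_, rfl⟩
          rw [List.append_assoc,
            List.eraseIdx_append_of_length_le (by simp : L'.reverse.length ≤ L'.length)]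
          simp
      · simp only [getPasswordStepA, getPasswordStepB, stRel, h1, h2, h3, if_neg,
          not_false_iff]
        refine ⟨?_, by simp⟩
        rw [List.take_left' (by simp), List.drop_left' (by simp)]
        simp

theorem stRel_foldl (ks : List String) (a : List String × List String) (b : List String × Nat)
    (h : stRel a b) :
    stRel (ks.foldl getPasswordStepA a) (ks.foldl getPasswordStepB b) := by
  induction ks generalizing a b with
  | nil => exact h
  | cons k ks ih => exact ih _ _ (stRel_step a b h k)

theorem chars_join_empty_append (xs ys : List (List Char)) :
    PySem.Chars.join [] (xs ++ ys) = PySem.Chars.join [] xs ++ PySem.Chars.join [] ys := by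
  induction xs with
  | nil => simp [PySem.Chars.join_nil]
  | cons x xs ih =>
    cases xs with
    | nil =>
      cases ys with
      | nil => simp [PySem.Chars.join_singleton, PySem.Chars.join_nil]
      | cons y ys => simp [PySem.Chars.join_cons_cons, PySem.Chars.join_singleton] at *
    | cons x' xs' => simp [PySem.Chars.join_cons_cons] at *; simp [ih]

theorem join_empty_append (xs ys : List String) :
    PySem.Str.join "" (xs ++ ys) = PySem.Str.join "" xs ++ PySem.Str.join "" ys := by
  simp [PySem.Str.join, chars_join_empty_append]

-- ===== VERDICT (by name: the statement is the Claim_ definition above) =====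
theorem get_password_spec : Claim_equal_get_password := by
  intro ks _
  unfold Spec_get_password get_password get_password_alt
  have h := stRel_foldl ks ([], []) ([], 0) ⟨rfl, rfl⟩
  obtain ⟨hb, _⟩ := h
  dsimp only
  rw [hb, join_empty_append]
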